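-- pv_equiv track=rewrite | github.com/mystoryfantacy/2048Solver | alpha_2048.py | score2vec
-- ===== SOURCE A (Python) =====
-- def score2vec(score):
--     v = [0] * 12
--     idx = -1
--     while score != 0:
--         score >>= 1
--         idx += 1
--     v[idx] = 1
--     return v
-- ===== SOURCE B (Python) =====
-- def score2vec(score):
--     idx = score.bit_length() - 1
--     v = [0] * 12
--     v[idx] = 1
--     return v
-- ===== Notes on version B (the rewrite author's own statement) =====
-- stated objective: idiomatic
-- what changed: Replaces the shift-and-count while loop with a closed-form int.bit_length() call to find the highest set bit index.
import Mathlib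
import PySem

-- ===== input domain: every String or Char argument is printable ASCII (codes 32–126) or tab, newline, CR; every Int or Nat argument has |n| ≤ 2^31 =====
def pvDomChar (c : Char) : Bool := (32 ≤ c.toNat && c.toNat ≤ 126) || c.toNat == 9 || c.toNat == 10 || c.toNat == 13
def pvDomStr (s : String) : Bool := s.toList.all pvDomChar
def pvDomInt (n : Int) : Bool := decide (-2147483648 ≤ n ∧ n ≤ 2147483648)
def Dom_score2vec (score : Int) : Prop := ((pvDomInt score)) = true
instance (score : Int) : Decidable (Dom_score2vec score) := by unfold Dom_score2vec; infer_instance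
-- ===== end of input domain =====

-- B replaces A's shift-and-count while loop with a closed-form bit_length computation (idiomatic).

-- ===== PORT A =====
-- A's while loop: shift score right by 1 until zero, counting. The fuel argument is only a
-- totality guard: for 0 ≤ score the loop terminates within natAbs score + 1 iterations.
def score2vecLoop : Nat → Int → Int → Int
  | 0, _, idx => idx
  | fuel + 1, s, idx =>
      if s = 0 then idx
      else score2vecLoop fuel (PySem.Int.floordiv s 2) (idx + 1)

def score2vec (score : Int) : List Int :=
  let v : List Int := List.replicate 12 0
  let idx := score2vecLoop (score.natAbs + 1) score (-1)
  PySem.List.pySetD v idx 1   -- v[idx] = 1 (in range under Pre_)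

-- ===== PORT B =====
def score2vec_alt (score : Int) : List Int :=
  let idx : Int := (PySem.Int.bitLength score : Int) - 1   -- score.bit_length() - 1
  let v : List Int := List.replicate 12 0
  PySem.List.pySetD v idx 1   -- v[idx] = 1 (in range under Pre_)

-- ===== PRECONDITION & SPEC =====
-- Pre_ is exactly A's return set: A loops forever on negative score (s >>= 1 never leaves -1),
-- and raises IndexError for score ≥ 4096 (idx ≥ 12).
def Pre_score2vec (score : Int) : Prop := 0 ≤ score ∧ score < 4096
instance (score : Int) : Decidable (Pre_score2vec score) := by unfold Pre_score2vec; infer_instance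
def pvWitness_score2vec : Int := (7)

def Spec_score2vec (score : Int) (out : List Int) : Prop := out = score2vec_alt score
instance (score : Int) (out : List Int) : Decidable (Spec_score2vec score out) := by unfold Spec_score2vec; infer_instance

-- ===== CLAIM (what is proved, stated in full; the proofs are below) =====
def Claim_equal_score2vec : Prop := ∀ (score : Int), Dom_score2vec score → Pre_score2vec score → Spec_score2vec score (score2vec score)

-- ===== LEMMAS AND PROOFS =====

-- The loop computes idx + bit_length(s), given enough fuel.
lemma score2vecLoop_eq (fuel : Nat) : ∀ (s idx : Int), 0 ≤ s → PySem.Int.bitLength s ≤ fuel →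
    score2vecLoop fuel s idx = idx + PySem.Int.bitLength s := by
  induction fuel with
  | zero =>
    intro s idx hs hf
    have hbl : PySem.Int.bitLength s = 0 := Nat.le_zero.mp hf
    have : s.natAbs < 2 ^ PySem.Int.bitLength s := PySem.Int.lt_two_pow_bitLength s
    rw [hbl] at this
    have hs0 : s = 0 := by omega
    simp [score2vecLoop, hbl]
  | succ n ih =>
    intro s idx hs hf
    by_cases h0 : s = 0
    · subst h0
      simp [score2vecLoop, PySem.Int.bitLength_zero]
    · have hpos : 0 < s := lt_of_le_of_ne hs (Ne.symm h0)
      have hstep : PySem.Int.bitLength s = PySem.Int.bitLength (PySem.Int.floordiv s 2) + 1 :=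
        PySem.Int.bitLength_of_pos hpos
      have hfd : 0 ≤ PySem.Int.floordiv s 2 := by
        rw [PySem.Int.le_floordiv_iff_mul_le] <;> omega
      have hlt : PySem.Int.bitLength (PySem.Int.floordiv s 2) ≤ n := by omega
      rw [score2vecLoop, if_neg h0, ih _ _ hfd hlt, hstep]
      push_cast
      ring

lemma bitLength_le_fuel (s : Int) (hs : 0 ≤ s) : PySem.Int.bitLength s ≤ s.natAbs + 1 := by
  by_cases h0 : s = 0
  · subst h0; simp [PySem.Int.bitLength_zero]
  · have h1 : 2 ^ (PySem.Int.bitLength s - 1) ≤ s.natAbs := PySem.Int.two_pow_bitLength_le s h0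
    have h2 : PySem.Int.bitLength s - 1 < 2 ^ (PySem.Int.bitLength s - 1) :=
      Nat.lt_two_pow_self
    omega

-- ===== VERDICT (by name: the statement is the Claim_ definition above) =====
theorem score2vec_spec : Claim_equal_score2vec := by
  intro score _ hpre
  unfold Spec_score2vec score2vec score2vec_alt
  have hloop := score2vecLoop_eq (score.natAbs + 1) score (-1) hpre.1
      (bitLength_le_fuel score hpre.1)
  rw [hloop]
  have h : (-1 : Int) + (PySem.Int.bitLength score : Int) = (PySem.Int.bitLength score : Int) - 1 := by omega
  rw [h]
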